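-- pv_equiv track=rewrite | github.com/Shivansh1980/checkmarx_integration | _restore_test/CheckmarxIntegration/src/checkmarx_dscan/application/reporting/report_builder.py | _ordered_counter
-- ===== SOURCE A (Python) =====
-- from collections import Counter
-- from typing import Any, Iterable
--
-- def _ordered_counter(counter: Counter[str], ordering: Iterable[str]) -> dict[str, int]:
-- 	ordered: dict[str, int] = {}
-- 	for key in ordering:
-- 		if counter.get(key, 0):
-- 			ordered[key] = counter[key]
-- 	for key in sorted(counter):
-- 		if key not in ordered and counter[key]:
-- 			ordered[key] = counter[key]
-- 	return ordered
-- ===== SOURCE B (Python) =====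
-- def _ordered_counter(counter, ordering):
--     order_list = list(ordering)
--     rank = {}
--     for i, k in enumerate(order_list):
--         if k not in rank:
--             rank[k] = i
--     sentinel = len(order_list)
--     keys = [k for k in counter if counter[k]]
--     keys.sort(key=lambda k: (rank.get(k, sentinel), k))
--     return {k: counter[k] for k in keys}
-- ===== Notes on version B (the rewrite author's own statement) =====
-- stated objective: alternative
-- what changed: Replaces A's two sequential dict-building passes (insert ordering keys, then insert remaining sorted keys) by building a first-occurrence rank table and doing one sort of the truthy counter keys under the lexicographic key (rank, key).
import Mathlib
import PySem

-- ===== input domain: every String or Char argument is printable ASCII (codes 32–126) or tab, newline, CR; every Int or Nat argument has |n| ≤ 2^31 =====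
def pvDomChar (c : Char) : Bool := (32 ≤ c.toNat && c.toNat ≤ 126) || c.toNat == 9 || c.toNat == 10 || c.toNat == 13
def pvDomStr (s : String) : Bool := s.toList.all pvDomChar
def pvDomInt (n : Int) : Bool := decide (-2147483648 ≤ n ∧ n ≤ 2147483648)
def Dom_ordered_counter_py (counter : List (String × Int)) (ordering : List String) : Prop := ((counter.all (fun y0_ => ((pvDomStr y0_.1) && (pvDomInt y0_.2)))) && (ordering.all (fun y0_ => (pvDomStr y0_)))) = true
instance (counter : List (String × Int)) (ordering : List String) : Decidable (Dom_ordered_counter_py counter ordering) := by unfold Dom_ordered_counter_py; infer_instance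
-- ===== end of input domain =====

-- B replaces A's two sequential build-up passes by a first-occurrence rank table and ONE sort of the
-- truthy keys under the lexicographic key (rank, key); same return value, alternative algorithm.

-- ===== PORT A =====
-- literal transliteration of _ordered_counter: dict loop over `ordering`, then loop over sorted keys
def ordered_counter_py (counter : List (String × Int)) (ordering : List String) : List (String × Int) :=
  let d : PySem.Dict String Int := PySem.Dict.mk counter
  let ordered1 : PySem.Dict String Int := ordering.foldl (fun od key =>
      if !(d.getD key 0 == 0) then od.insert key (d.getD key 0) else od) PySem.Dict.empty
  let ordered2 : PySem.Dict String Int := (PySem.List.sorted d.keys (fun k => k)).foldl (fun od key =>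
      if !od.contains key && !(d.getD key 0 == 0) then od.insert key (d.getD key 0) else od) ordered1
  ordered2.items

-- ===== PORT B =====
-- literal transliteration of Source B: first-occurrence rank table, filter truthy keys, one sort by (rank, key)
def ordered_counter_py_alt (counter : List (String × Int)) (ordering : List String) : List (String × Int) :=
  let d : PySem.Dict String Int := PySem.Dict.mk counter
  let rank : PySem.Dict String Int := (PySem.List.enumerate ordering).foldl (fun r p =>
      if !r.contains p.2 then r.insert p.2 p.1 else r) PySem.Dict.empty
  let sentinel : Int := ordering.length
  let keys : List String := d.keys.filter (fun k => !(d.getD k 0 == 0))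
  let skeys : List String := PySem.List.sorted2 keys (fun k => rank.getD k sentinel) (fun k => k)
  (skeys.foldl (fun od k => od.insert k (d.getD k 0)) (PySem.Dict.empty : PySem.Dict String Int)).items

-- ===== PRECONDITION & SPEC =====
-- Pre_ excludes counters whose association list repeats a key: a Python Counter has unique keys,
-- so such lists do not encode any actual input of A (last-wins dict construction vs the
-- convention's first-match lookup would disagree on them).
def Pre_ordered_counter_py (counter : List (String × Int)) (ordering : List String) : Prop :=
  (counter.map Prod.fst).Nodup
instance (counter : List (String × Int)) (ordering : List String) : Decidable (Pre_ordered_counter_py counter ordering) := by unfold Pre_ordered_counter_py; infer_instance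
def pvWitness_ordered_counter_py : (List (String × Int)) × List String :=
  ([("b", 2), ("a", 1), ("c", 0)], ["b", "z"])
def Spec_ordered_counter_py (counter : List (String × Int)) (ordering : List String) (out : List (String × Int)) : Prop := out = ordered_counter_py_alt counter ordering
instance (counter : List (String × Int)) (ordering : List String) (out : List (String × Int)) : Decidable (Spec_ordered_counter_py counter ordering out) := by unfold Spec_ordered_counter_py; infer_instance

-- ===== CLAIM (what is proved, stated in full; the proofs are below) =====
def Claim_equal_ordered_counter_py : Prop := ∀ (counter : List (String × Int)) (ordering : List String), Dom_ordered_counter_py counter ordering → Pre_ordered_counter_py counter ordering → Spec_ordered_counter_py counter ordering (ordered_counter_py counter ordering)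

-- ===== LEMMAS AND PROOFS =====

-- dedup of a cons, in filter form
theorem pvDedup_cons (x : String) (l : List String) :
    PySem.List.dedup (x :: l) = x :: (PySem.List.dedup l).filter (fun y => !(y == x)) := by
  show PySem.Set.ofList (x :: l) = _
  rw [PySem.Set.ofList_cons]
  rfl

-- sorted2's tuple comparator is the lexicographic order on the pair key
theorem pvSorted2_eq_sorted_toLex {α : Type} (xs : List α) (k1 : α → Int) (k2 : α → String) :
    PySem.List.sorted2 xs k1 k2 = PySem.List.sorted xs (fun x => toLex (k1 x, k2 x)) := by
  rw [PySem.List.sorted_eq_foldl_insertBy]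
  show List.foldl (fun acc x => PySem.List.insertBy
      (fun a b => decide (k1 a < k1 b) || (!decide (k1 b < k1 a) && decide (k2 a < k2 b))) x acc) [] xs = _
  congr 1
  funext acc x
  congr 1
  funext a b
  rcases lt_trichotomy (k1 a) (k1 b) with h | h | h
  · simp [Prod.Lex.toLex_lt_toLex, h]
  · simp [Prod.Lex.toLex_lt_toLex, h, lt_irrefl]
  · simp [Prod.Lex.toLex_lt_toLex, h, not_lt_of_gt h, (ne_of_gt h)]

-- the rank-table fold looked up with a default: first-occurrence index, else the default
theorem pvRank_getD (l : List String) (s : Int) (r : PySem.Dict String Int) (k : String) (dflt : Int) :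
    ((PySem.List.enumerate l s).foldl (fun r p => if !r.contains p.2 then r.insert p.2 p.1 else r) r).getD k dflt
      = if r.contains k then r.getD k dflt
        else if k ∈ l then s + (List.idxOf k l : Int) else dflt := by
  induction l generalizing s r with
  | nil =>
    rw [show PySem.List.enumerate ([] : List String) s = [] from rfl]
    cases hc : r.contains k with
    | true => simp [hc]
    | false => simp [hc, PySem.Dict.getD_of_not_contains r dflt hc]
  | cons x t ih =>
    rw [show PySem.List.enumerate (x :: t) s = (s, x) :: PySem.List.enumerate t (s + 1) from by
          simp [PySem.List.enumerate],
        List.foldl_cons]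
    cases hc : r.contains x with
    | true =>
      rw [if_neg (by simp [hc]), ih]
      cases hck : r.contains k with
      | true => simp [hck]
      | false =>
        have hkx : k ≠ x := by rintro rfl; rw [hc] at hck; cases hck
        have hxk : (x == k) = false := by simpa using fun h => hkx h.symm
        simp only [hck, if_false, Bool.false_eq_true, ite_false]
        by_cases hm : k ∈ t
        · simp [hm, hkx, List.idxOf_cons, hxk]
          push_cast
          ring
        · simp [hm, hkx]
    | false =>
      rw [if_pos (by simp [hc]), ih]
      by_cases hkx : k = x
      · subst hkx
        rw [if_pos (by simp [PySem.Dict.contains_insert, hc])]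
        rw [PySem.Dict.getD_insert_self]
        simp [hc, List.idxOf_cons]
      · have hxk : (x == k) = false := by simpa using fun h => hkx h.symm
        rw [PySem.Dict.contains_insert, PySem.Dict.getD_insert, if_neg hkx]
        have : (k == x) = false := by simpa using hkx
        rw [this, Bool.false_or]
        cases hck : r.contains k with
        | true => simp [hck]
        | false =>
          simp only [if_false, Bool.false_eq_true, ite_false]
          by_cases hm : k ∈ t
          · simp [hm, hkx, List.idxOf_cons, hxk]
            push_cast
            ring
          · simp [hm, hkx]

-- A's first loop: items after a guarded value-consistent insert fold
theorem pvItems_foldl_guard_insert (d : PySem.Dict String Int) (l : List String)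
    (od : PySem.Dict String Int) (hnd : od.keys.Nodup) (hv : ∀ p ∈ od.items, p.2 = d.getD p.1 0) :
    (l.foldl (fun od k => if !(d.getD k 0 == 0) then od.insert k (d.getD k 0) else od) od).items
      = od.items ++ ((PySem.List.dedup (l.filter (fun k => !(d.getD k 0 == 0)))).filter (fun k => !od.contains k)).map (fun k => (k, d.getD k 0)) := by
  induction l generalizing od with
  | nil => simp [PySem.List.dedup, PySem.Set.ofList, PySem.Set.empty]
  | cons x t ih =>
    rw [List.foldl_cons, List.filter_cons]
    cases hcx : (!(d.getD x 0 == 0)) with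
    | false =>
      rw [if_neg (by simp [hcx])]
      simp only [hcx, Bool.false_eq_true, ite_false]
      exact ih od hnd hv
    | true =>
      simp only [reduceIte]
      rw [pvDedup_cons]
      have hv' : ∀ p ∈ (od.insert x (d.getD x 0)).items, p.2 = d.getD p.1 0 := by
        intro p hp
        rcases (PySem.Dict.mem_items_insert od x (d.getD x 0) p).mp hp with h | ⟨h, _⟩
        · subst h; rfl
        · exact hv p h
      rw [ih (od.insert x (d.getD x 0)) (PySem.Dict.nodup_keys_insert od x (d.getD x 0) hnd) hv']
      cases hcont : od.contains x with
      | true =>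
        have hitems : (od.insert x (d.getD x 0)).items = od.items := by
          rw [PySem.Dict.items_insert_of_contains od (d.getD x 0) hcont]
          rw [show od.items = od.items.map id from (List.map_id od.items).symm]
          conv_lhs => rw [List.map_map]
          apply List.map_congr_left
          intro p hp
          by_cases hpx : (p.1 == x) = true
          · have h1 : p.1 = x := by simpa using hpx
            have h2 : p.2 = d.getD p.1 0 := hv p (by simpa using hp)
            simp only [Function.comp, id, hpx, if_true]
            cases p; simp_all
          · simp [Function.comp, hpx]
        rw [hitems]
        congr 1
        rw [List.filter_cons_of_neg (by simp [hcont]), List.filter_filter]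
        congr 1
        apply List.filter_congr
        intro a _
        rw [PySem.Dict.contains_insert]
        cases hax : (a == x) <;> cases hoa : od.contains a <;> simp [hax, hoa]
      | false =>
        have hfe : (PySem.List.dedup (List.filter (fun k => !(d.getD k 0 == 0)) t)).filter (fun k => !(od.insert x (d.getD x 0)).contains k)
                 = ((PySem.List.dedup (List.filter (fun k => !(d.getD k 0 == 0)) t)).filter (fun y => !(y == x))).filter (fun k => !od.contains k) := by
          rw [List.filter_filter]
          apply List.filter_congr
          intro a _
          rw [PySem.Dict.contains_insert]
          cases hax : (a == x) <;> cases hoa : od.contains a <;> simp [hax, hoa]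
        rw [PySem.Dict.items_insert_of_not_contains od (d.getD x 0) hcont, List.append_assoc, hfe,
            List.filter_cons_of_pos (by simp [hcont]), List.map_cons, List.singleton_append]

-- A's second loop: fold over a duplicate-free list inserting only fresh keys appends
theorem pvItems_foldl_fresh_guard (d : PySem.Dict String Int) (l : List String)
    (od : PySem.Dict String Int) (hl : l.Nodup) :
    (l.foldl (fun od k => if !od.contains k && !(d.getD k 0 == 0) then od.insert k (d.getD k 0) else od) od).items
      = od.items ++ (l.filter (fun k => !od.contains k && !(d.getD k 0 == 0))).map (fun k => (k, d.getD k 0)) := by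
  induction l generalizing od with
  | nil => simp
  | cons x t ih =>
    obtain ⟨hx, ht⟩ := List.nodup_cons.mp hl
    rw [List.foldl_cons, List.filter_cons]
    cases hg : (!od.contains x && !(d.getD x 0 == 0)) with
    | false =>
      rw [if_neg (by simp [hg])]
      simp only [hg, Bool.false_eq_true, ite_false]
      exact ih od ht
    | true =>
      simp only [reduceIte]
      have hfresh : od.contains x = false := by
        cases h : od.contains x
        · rfl
        · rw [h] at hg; simp at hg
      have hfe : t.filter (fun k => !(od.insert x (d.getD x 0)).contains k && !(d.getD k 0 == 0))
               = t.filter (fun k => !od.contains k && !(d.getD k 0 == 0)) := by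
        apply List.filter_congr
        intro a ha
        have hax : (a == x) = false := by
          simpa using fun h : a = x => hx (h ▸ ha)
        rw [PySem.Dict.contains_insert, hax, Bool.false_or]
      rw [ih (od.insert x (d.getD x 0)) ht, PySem.Dict.items_insert_of_not_contains od (d.getD x 0) hfresh,
          List.append_assoc, hfe, List.map_cons, List.singleton_append]

-- dedup commutes with filter
theorem pvDedup_filter (p : String → Bool) (l : List String) :
    PySem.List.dedup (l.filter p) = (PySem.List.dedup l).filter p := by
  induction l with
  | nil => rfl
  | cons x t ih =>
    rw [List.filter_cons, pvDedup_cons]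
    cases hx : p x with
    | true =>
      simp only [hx, ite_true]
      rw [pvDedup_cons, ih, List.filter_cons_of_pos hx]
      congr 1
      rw [List.filter_filter, List.filter_filter]
      apply List.filter_congr
      intro a _
      rw [Bool.and_comm]
    | false =>
      simp only [hx, Bool.false_eq_true, ite_false]
      rw [ih, List.filter_cons_of_neg (by simp [hx]), List.filter_filter]
      apply (List.filter_congr ?_).symm
      intro a _
      by_cases hax : a = x
      · subst hax; simp [hx]
      · simp [hax]

-- first-occurrence order: dedup is strictly increasing in idxOf
theorem pvPairwise_idxOf_dedup (l : List String) :
    List.Pairwise (fun a b => List.idxOf a l < List.idxOf b l) (PySem.List.dedup l) := by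
  induction l with
  | nil => exact List.Pairwise.nil
  | cons x t ih =>
    rw [pvDedup_cons]
    constructor
    · intro b hb
      have hbx : b ≠ x := by
        have := (List.mem_filter.mp hb).2
        simpa using this
      have hxb : (x == b) = false := by simpa using fun h => hbx h.symm
      rw [List.idxOf_cons, List.idxOf_cons]
      simp [hxb]
    · refine List.Pairwise.imp_of_mem ?_ (ih.filter _)
      intro a b ha hb hab
      have hax : (x == a) = false := by
        have := (List.mem_filter.mp ha).2
        simpa using fun h => (by simpa using this : a ≠ x) h.symm
      have hbx : (x == b) = false := by
        have := (List.mem_filter.mp hb).2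
        simpa using fun h => (by simpa using this : b ≠ x) h.symm
      rw [List.idxOf_cons, List.idxOf_cons]
      simp [hax, hbx]
      omega

-- a key with nonzero getD is present
theorem pvMem_keys_of_getD_ne (d : PySem.Dict String Int) (k : String)
    (h : (d.getD k 0 == 0) = false) : k ∈ d.keys := by
  cases hc : d.contains k with
  | false => rw [PySem.Dict.getD_of_not_contains d 0 hc] at h; simp at h
  | true => exact (PySem.Dict.contains_iff_mem_keys d k).mp hc

theorem pvMain (counter : List (String × Int)) (ordering : List String)
    (hK : (counter.map Prod.fst).Nodup) :
    ordered_counter_py counter ordering = ordered_counter_py_alt counter ordering := by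
  have hKn : (PySem.Dict.mk counter).keys.Nodup := hK
  simp only [ordered_counter_py, ordered_counter_py_alt]
  revert hKn
  generalize PySem.Dict.mk counter = d
  intro hKn
  have himp : ∀ a : String, (!(d.getD a 0 == 0)) = true → a ∈ d.keys := by
    intro a h
    exact pvMem_keys_of_getD_ne d a (by simpa using h)
  have hemptyi : (PySem.Dict.empty : PySem.Dict String Int).items = [] := rfl
  have hsortnd : (PySem.List.sorted d.keys (fun k => k)).Nodup :=
    ((PySem.List.sorted_perm d.keys (fun k => k) false).nodup_iff).mpr hKn
  -- A: second loop
  rw [pvItems_foldl_fresh_guard d (PySem.List.sorted d.keys (fun k => k)) _ hsortnd]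
  -- A: first loop
  have h1 : (ordering.foldl (fun od key => if !(d.getD key 0 == 0) then od.insert key (d.getD key 0) else od) (PySem.Dict.empty : PySem.Dict String Int)).items
      = (PySem.List.dedup (ordering.filter (fun k => !(d.getD k 0 == 0)))).map (fun k => (k, d.getD k 0)) := by
    rw [pvItems_foldl_guard_insert d ordering PySem.Dict.empty
        (by rw [show (PySem.Dict.empty : PySem.Dict String Int).keys = [] from rfl]; exact List.nodup_nil)
        (by intro p hp; rw [hemptyi] at hp; cases hp)]
    rw [hemptyi, List.nil_append]
    congr 1
    exact List.filter_eq_self.mpr (fun a _ => by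
      rw [show (PySem.Dict.empty : PySem.Dict String Int).contains a = false from rfl]; rfl)
  rw [h1]
  have hkeys1 : (ordering.foldl (fun od key => if !(d.getD key 0 == 0) then od.insert key (d.getD key 0) else od) (PySem.Dict.empty : PySem.Dict String Int)).keys
      = PySem.List.dedup (ordering.filter (fun k => !(d.getD k 0 == 0))) := by
    show List.map (fun x => x.1) (ordering.foldl (fun od key => if !(d.getD key 0 == 0) then od.insert key (d.getD key 0) else od) (PySem.Dict.empty : PySem.Dict String Int)).items = _
    rw [h1, List.map_map]
    have hid : ((fun x : String × Int => x.1) ∘ fun k : String => (k, d.getD k 0)) = id := by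
      funext k; rfl
    rw [hid, List.map_id]
  have hfilt : (PySem.List.sorted d.keys (fun k => k)).filter
        (fun k => !(ordering.foldl (fun od key => if !(d.getD key 0 == 0) then od.insert key (d.getD key 0) else od) (PySem.Dict.empty : PySem.Dict String Int)).contains k && !(d.getD k 0 == 0))
      = (PySem.List.sorted d.keys (fun k => k)).filter
        (fun k => !(decide (k ∈ ordering)) && !(d.getD k 0 == 0)) := by
    apply List.filter_congr
    intro a _
    rw [PySem.Dict.contains_eq_decide_mem_keys, hkeys1]
    by_cases hm : a ∈ ordering <;> by_cases hz : (d.getD a 0 == 0) = true <;>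
      simp [PySem.List.mem_dedup, List.mem_filter, hm, hz]
  rw [hfilt]
  -- B: the rank table is the idxOf function
  have hks : (fun k : String => ((PySem.List.enumerate ordering).foldl
        (fun r p => if !r.contains p.2 then r.insert p.2 p.1 else r) (PySem.Dict.empty : PySem.Dict String Int)).getD k ((ordering.length : Int)))
      = fun k => (List.idxOf k ordering : Int) := by
    funext k
    rw [pvRank_getD]
    rw [if_neg (by rw [show (PySem.Dict.empty : PySem.Dict String Int).contains k = false from rfl]; simp)]
    by_cases hm : k ∈ ordering
    · simp [hm]
    · simp [hm, List.idxOf_eq_length hm]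
  rw [hks, pvSorted2_eq_sorted_toLex]
  -- names for the three lists
  have hndP : (PySem.List.dedup (ordering.filter (fun k => !(d.getD k 0 == 0)))).Nodup :=
    PySem.List.nodup_dedup _
  have hndQ : ((PySem.List.sorted d.keys (fun k => k)).filter
      (fun k => !(decide (k ∈ ordering)) && !(d.getD k 0 == 0))).Nodup := hsortnd.filter _
  have hdisj : (PySem.List.dedup (ordering.filter (fun k => !(d.getD k 0 == 0)))).Disjoint
      ((PySem.List.sorted d.keys (fun k => k)).filter
        (fun k => !(decide (k ∈ ordering)) && !(d.getD k 0 == 0))) := by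
    intro a haP haQ
    have h1 : a ∈ ordering := by
      rw [PySem.List.mem_dedup] at haP
      exact (List.mem_filter.mp haP).1
    have h2 := (List.mem_filter.mp haQ).2
    rw [Bool.and_eq_true] at h2
    have := h2.1
    simp [h1] at this
  have hndPQ : (PySem.List.dedup (ordering.filter (fun k => !(d.getD k 0 == 0)))
      ++ (PySem.List.sorted d.keys (fun k => k)).filter
          (fun k => !(decide (k ∈ ordering)) && !(d.getD k 0 == 0))).Nodup :=
    List.Nodup.append hndP hndQ hdisj
  have hkeysB : (d.keys.filter (fun k => !(d.getD k 0 == 0))).Nodup := hKn.filter _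
  have hmem : ∀ a : String, a ∈ (PySem.List.dedup (ordering.filter (fun k => !(d.getD k 0 == 0)))
      ++ (PySem.List.sorted d.keys (fun k => k)).filter
          (fun k => !(decide (k ∈ ordering)) && !(d.getD k 0 == 0)))
      ↔ a ∈ d.keys.filter (fun k => !(d.getD k 0 == 0)) := by
    intro a
    simp only [List.mem_append, PySem.List.mem_dedup, List.mem_filter, PySem.List.mem_sorted,
      Bool.and_eq_true]
    constructor
    · rintro (⟨ho, hcv⟩ | ⟨hk, _, hcv⟩)
      · exact ⟨himp a hcv, hcv⟩
      · exact ⟨hk, hcv⟩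
    · rintro ⟨hk, hcv⟩
      by_cases hm : a ∈ ordering
      · exact Or.inl ⟨hm, hcv⟩
      · exact Or.inr ⟨hk, by simpa using hm, hcv⟩
  have hperm2 : (PySem.List.dedup (ordering.filter (fun k => !(d.getD k 0 == 0)))
      ++ (PySem.List.sorted d.keys (fun k => k)).filter
          (fun k => !(decide (k ∈ ordering)) && !(d.getD k 0 == 0))).Perm
      (d.keys.filter (fun k => !(d.getD k 0 == 0))) :=
    (List.perm_ext_iff_of_nodup hndPQ hkeysB).mpr hmem
  have hpw : List.Pairwise (fun a b : String =>
        (toLex ((List.idxOf a ordering : Int), a)) < (toLex ((List.idxOf b ordering : Int), b)))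
      (PySem.List.dedup (ordering.filter (fun k => !(d.getD k 0 == 0)))
        ++ (PySem.List.sorted d.keys (fun k => k)).filter
            (fun k => !(decide (k ∈ ordering)) && !(d.getD k 0 == 0))) := by
    rw [List.pairwise_append]
    refine ⟨?_, ?_, ?_⟩
    · rw [pvDedup_filter]
      refine ((pvPairwise_idxOf_dedup ordering).filter _).imp ?_
      intro a b h
      refine Prod.Lex.toLex_lt_toLex.mpr (Or.inl ?_)
      show (List.idxOf a ordering : Int) < (List.idxOf b ordering : Int)
      exact_mod_cast h
    · have h1 := (PySem.List.sorted_pairwise d.keys (fun k => k)).filter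
        (fun k => !(decide (k ∈ ordering)) && !(d.getD k 0 == 0))
      have h2 : List.Pairwise (fun a b : String => a ≠ b)
          ((PySem.List.sorted d.keys (fun k => k)).filter
            (fun k => !(decide (k ∈ ordering)) && !(d.getD k 0 == 0))) := hndQ
      refine List.Pairwise.imp_of_mem ?_ (h1.and h2)
      intro a b ha hb hab
      have hao : a ∉ ordering := by
        have h := (List.mem_filter.mp ha).2
        rw [Bool.and_eq_true] at h
        simpa using h.1
      have hbo : b ∉ ordering := by
        have h := (List.mem_filter.mp hb).2
        rw [Bool.and_eq_true] at h
        simpa using h.1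
      refine Prod.Lex.toLex_lt_toLex.mpr (Or.inr ⟨?_, ?_⟩)
      · show (List.idxOf a ordering : Int) = (List.idxOf b ordering : Int)
        rw [List.idxOf_eq_length hao, List.idxOf_eq_length hbo]
      · show a < b
        exact lt_of_le_of_ne hab.1 hab.2
    · intro a ha b hb
      have hao : a ∈ ordering := by
        rw [PySem.List.mem_dedup] at ha
        exact (List.mem_filter.mp ha).1
      have hbo : b ∉ ordering := by
        have h := (List.mem_filter.mp hb).2
        rw [Bool.and_eq_true] at h
        simpa using h.1
      refine Prod.Lex.toLex_lt_toLex.mpr (Or.inl ?_)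
      show (List.idxOf a ordering : Int) < (List.idxOf b ordering : Int)
      rw [List.idxOf_eq_length hbo]
      have h1 : List.idxOf a ordering < ordering.length := List.idxOf_lt_length_of_mem hao
      exact_mod_cast h1
  have hside : PySem.List.sorted (d.keys.filter (fun k => !(d.getD k 0 == 0)))
        (fun k => toLex ((List.idxOf k ordering : Int), k))
      = PySem.List.dedup (ordering.filter (fun k => !(d.getD k 0 == 0)))
        ++ (PySem.List.sorted d.keys (fun k => k)).filter
            (fun k => !(decide (k ∈ ordering)) && !(d.getD k 0 == 0)) :=
    PySem.List.sorted_eq_of_perm_of_pairwise_lt _ _ _ hperm2 hpw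
  rw [hside]
  rw [PySem.Dict.items_foldl_insert_fresh _ (fun a => a) (fun a => d.getD a 0) PySem.Dict.empty
      (fun a _ => rfl) (by simpa using hndPQ)]
  simp [List.map_append, hemptyi]

-- ===== VERDICT (by name: the statement is the Claim_ definition above) =====
theorem ordered_counter_py_spec : Claim_equal_ordered_counter_py := by
  intro counter ordering _ hpre
  show ordered_counter_py counter ordering = ordered_counter_py_alt counter ordering
  exact pvMain counter ordering hpre
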